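/- GENERATED by farm/mkstatement.py from design/units.tsv (unit `DGifBufferedInput.E`) and the assertions of Gif/Spec/Seg_DGifBufferedInput.lean — do not edit.
   THE STATEMENT of the proof unit `DGifBufferedInput.E`: segment E of `DGifBufferedInput` (7 instructions; entries 0x10659d;
   exits ret; ranges 0x10659d-0x1065a8)
   takes each of its entry assertions to one of its exit assertions (`Gif.Spec.DGifBufferedInput.SegE`), given the contracts of its callees.
   What the names mean: ProgX/Base/Spec/Basic.lean (the shared hypotheses), Gif/Spec/Seg_DGifBufferedInput.lean (the assertions). The theorem to prove:
   `theorem DGifBufferedInput_E_ok : Gif.Spec.DGifBufferedInput_E.Statement`. -/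
import Gif.Code
import Gif.Dec.All
import Gif.Labels
import Gif.Spec.Seg_DGifBufferedInput
namespace Gif.Spec.DGifBufferedInput_E
open X86 X86.User Asan

/-- The statement of unit `DGifBufferedInput.E`. -/
def Statement : Prop :=
  ∀ (Lay : Layout) (_hLay : Lay.hi = 0x1000000) (μ : Microarch) (_hμ : UserX.MicroOK μ) (u₀ : State)
    (_hcode : HasCodeNat Lay u₀ Gif.L.DGifBufferedInput.entry Gif.Code.code_DGifBufferedInput.nat Gif.L.DGifBufferedInput.size),
    Gif.Spec.DGifBufferedInput.SegE Lay μ u₀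

end Gif.Spec.DGifBufferedInput_E
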